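-- pv_equiv track=rewrite | github.com/ClSlaid/PY_FinalWorks | 万年历.py | lunar_year
-- ===== SOURCE A (Python) =====
-- def lunar_year(year):#计算干支年和年的属相
-- 	T='甲乙丙丁戊己庚辛壬癸'
-- 	D='子丑寅卯辰巳午未申酉戌亥'
-- 	S='鼠牛虎兔龙蛇马羊猴鸡狗猪'
-- 	n=year-1984
-- 	while n<0:
-- 		n=n+60
-- 	return T[n%10]+D[n%12]+S[n%12]+'年'+'	'
-- ===== SOURCE B (Python) =====
-- def lunar_year(year):
--     T = '甲乙丙丁戊己庚辛壬癸'
--     D = '子丑寅卯辰巳午未申酉戌亥'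
--     S = '鼠牛虎兔龙蛇马羊猴鸡狗猪'
--     cycle = [T[i % 10] + D[i % 12] + S[i % 12] + '年' + '\t' for i in range(60)]
--     return cycle[(year - 1984) % 60]
-- ===== Notes on version B (the rewrite author's own statement) =====
-- stated objective: simpler
-- what changed: Replaces the while-loop normalization plus three string lookups by building the full 60-entry sexagenary cycle once and returning cycle[(year-1984)%60], relying on Python's non-negative modulo.
import Mathlib
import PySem

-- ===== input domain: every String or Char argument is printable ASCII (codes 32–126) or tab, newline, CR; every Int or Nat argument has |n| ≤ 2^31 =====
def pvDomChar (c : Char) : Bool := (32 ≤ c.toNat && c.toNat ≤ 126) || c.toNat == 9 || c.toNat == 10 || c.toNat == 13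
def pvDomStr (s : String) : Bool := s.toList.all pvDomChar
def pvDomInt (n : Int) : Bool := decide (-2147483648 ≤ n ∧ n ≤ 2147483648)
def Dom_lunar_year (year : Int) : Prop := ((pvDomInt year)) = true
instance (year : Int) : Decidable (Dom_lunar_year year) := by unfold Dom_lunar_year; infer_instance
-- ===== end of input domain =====

-- B builds the 60-entry sexagenary cycle once and indexes it with (year-1984) % 60,
-- replacing A's while-loop normalization (objective: simpler).

-- ===== PORT A =====
-- 'while n<0: n=n+60'
def lunarNorm (n : Int) : Int :=
  if n < 0 then lunarNorm (n + 60) else n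
termination_by (-n).toNat
decreasing_by omega

def lunar_year (year : Int) : String :=
  let T := "甲乙丙丁戊己庚辛壬癸"
  let D := "子丑寅卯辰巳午未申酉戌亥"
  let S := "鼠牛虎兔龙蛇马羊猴鸡狗猪"
  let n := lunarNorm (year - 1984)
  -- indices n%10, n%12 are always in range after the loop, so the getD default is never used
  String.mk [(PySem.Str.pyGet? T (PySem.Int.mod n 10)).getD ' ',
             (PySem.Str.pyGet? D (PySem.Int.mod n 12)).getD ' ',
             (PySem.Str.pyGet? S (PySem.Int.mod n 12)).getD ' '] ++ "年" ++ "\t"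

-- ===== PORT B =====
def lunarEntry (i : Int) : String :=
  String.mk [(PySem.Str.pyGet? "甲乙丙丁戊己庚辛壬癸" (PySem.Int.mod i 10)).getD ' ',
             (PySem.Str.pyGet? "子丑寅卯辰巳午未申酉戌亥" (PySem.Int.mod i 12)).getD ' ',
             (PySem.Str.pyGet? "鼠牛虎兔龙蛇马羊猴鸡狗猪" (PySem.Int.mod i 12)).getD ' '] ++ "年" ++ "\t"

def lunar_year_alt (year : Int) : String :=
  let cycle := (PySem.List.pyRange 0 60 1).map lunarEntry
  -- index (year-1984)%60 is always in [0,60), so the getD default is never used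
  (PySem.List.pyGet? cycle (PySem.Int.mod (year - 1984) 60)).getD ""

-- ===== PRECONDITION & SPEC =====
def Spec_lunar_year (year : Int) (out : String) : Prop := out = lunar_year_alt year
instance (year : Int) (out : String) : Decidable (Spec_lunar_year year out) := by unfold Spec_lunar_year; infer_instance

-- ===== CLAIM (what is proved, stated in full; the proofs are below) =====
def Claim_equal_lunar_year : Prop := ∀ (year : Int), Dom_lunar_year year → Spec_lunar_year year (lunar_year year)

-- ===== LEMMAS AND PROOFS =====
theorem lunarNorm_eq_add_mul (n : Int) : ∃ k : Int, lunarNorm n = n + 60 * k := by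
  fun_induction lunarNorm n with
  | case1 n h ih =>
    obtain ⟨k, hk⟩ := ih
    exact ⟨k + 1, by omega⟩
  | case2 n h => exact ⟨0, by omega⟩

-- ===== VERDICT (by name: the statement is the Claim_ definition above) =====
theorem lunar_year_spec : Claim_equal_lunar_year := by
  intro year _
  unfold Spec_lunar_year lunar_year lunar_year_alt
  obtain ⟨k, hk⟩ := lunarNorm_eq_add_mul (year - 1984)
  dsimp only
  set n := year - 1984 with hn
  have h60 : PySem.Int.mod n 60 = n % 60 := PySem.Int.mod_eq_emod_of_pos (by omega)
  have hm0 : 0 ≤ n % 60 := Int.emod_nonneg n (by omega)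
  have hm1 : n % 60 < 60 := Int.emod_lt_of_pos n (by omega)
  have hidx : PySem.List.pyGet? ((PySem.List.pyRange 0 60 1).map lunarEntry) (PySem.Int.mod n 60)
      = some (lunarEntry (n % 60)) := by
    rw [h60, PySem.List.pyGet?_of_nonneg _ hm0]
    rw [List.getElem?_map]
    rw [PySem.List.getElem?_pyRange_one 0 60 (n % 60).toNat]
    rw [if_pos (by omega)]
    simp [Int.toNat_of_nonneg hm0]
  rw [hidx]
  unfold lunarEntry
  have e10 : PySem.Int.mod (lunarNorm n) 10 = PySem.Int.mod (n % 60) 10 := by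
    rw [PySem.Int.mod_eq_emod_of_pos (by omega), PySem.Int.mod_eq_emod_of_pos (by omega), hk]
    omega
  have e12 : PySem.Int.mod (lunarNorm n) 12 = PySem.Int.mod (n % 60) 12 := by
    rw [PySem.Int.mod_eq_emod_of_pos (by omega), PySem.Int.mod_eq_emod_of_pos (by omega), hk]
    omega
  simp only [Option.getD_some, e10, e12]
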